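-- pv_equiv track=rewrite | github.com/juansebastian2006/Binary-Translator | BinaryTranslator.py | binary_format
-- ===== SOURCE A (Python) =====
-- def binary_format(binary_code):
--     new_format1 = []
--
--     for i, b in enumerate(binary_code.split()):
--         new_format1.append(b + '\n' if (i + 1) % 3 == 0 else b + ' ')
--
--     try:
--         new_format1[0] = ' ' + new_format1[0]
--     except IndexError: pass
--
--     for i, b in enumerate(new_format1):
--         if i != len(new_format1) - 1:
--             if '\n' in b:
--                 new_format1[i + 1] = ' ' + new_format1[i + 1]
--     return ''.join(new_format1)
-- ===== SOURCE B (Python) =====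
-- def binary_format(binary_code):
--     tokens = binary_code.split()
--     lines = []
--     for i in range(0, len(tokens), 3):
--         group = tokens[i:i+3]
--         lines.append(' ' + ' '.join(group) + ('\n' if len(group) == 3 else ' '))
--     return ''.join(lines)
-- ===== Notes on version B (the rewrite author's own statement) =====
-- stated objective: simpler
-- what changed: B splits into tokens once and emits one line per chunk of three tokens (slice + ' '.join with a '\n'/' ' terminator), replacing A's per-token modular-arithmetic append pass followed by a separate neighbour-fixup pass that re-scans the list and mutates successors of newline-bearing entries.
import Mathlib
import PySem

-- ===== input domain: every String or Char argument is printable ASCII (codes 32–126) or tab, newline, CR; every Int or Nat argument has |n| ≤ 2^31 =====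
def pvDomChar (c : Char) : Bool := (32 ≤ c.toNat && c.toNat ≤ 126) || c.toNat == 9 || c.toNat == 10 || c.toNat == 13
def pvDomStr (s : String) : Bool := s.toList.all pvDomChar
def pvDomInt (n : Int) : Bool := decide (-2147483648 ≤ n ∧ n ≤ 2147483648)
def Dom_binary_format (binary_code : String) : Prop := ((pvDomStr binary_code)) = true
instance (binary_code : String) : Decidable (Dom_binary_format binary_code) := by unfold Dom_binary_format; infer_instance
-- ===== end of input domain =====

-- B replaces A's per-token modular pass plus neighbour-fixup pass with a single chunks-of-three pass (objective: simpler).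


-- ===== PORT A =====
def binary_format (binary_code : String) : String :=
  -- for i, b in enumerate(binary_code.split()): append b+'\n' if (i+1)%3==0 else b+' '
  let new1 : List String :=
    (PySem.List.enumerate (PySem.Str.split₀ binary_code) 0).foldl
      (fun acc p =>
        acc ++ [if PySem.Int.mod (p.1 + 1) 3 = 0 then p.2 ++ "\n" else p.2 ++ " "]) []
  -- try: new_format1[0] = ' ' + new_format1[0]  except IndexError: pass
  let new2 : List String :=
    match new1 with
    | [] => []
    | h :: t => (" " ++ h) :: t
  -- for i, b in enumerate(new_format1): if i != len-1 and '\n' in b: new_format1[i+1] = ' ' + new_format1[i+1]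
  -- (index loop over the LIVE list: ported as a fold over range reading the evolving state)
  let n : Int := (new2.length : Int)
  let new3 : List String :=
    (PySem.List.pyRange 0 n 1).foldl
      (fun lst i =>
        let b := PySem.List.pyGetD lst i ""
        if i ≠ n - 1 then
          if PySem.Str.isIn "\n" b then
            lst.set (i + 1).toNat (" " ++ PySem.List.pyGetD lst (i + 1) "")
          else lst
        else lst) new2
  PySem.Str.join "" new3

-- ===== PORT B =====
def binary_format_alt (binary_code : String) : String :=
  let tokens : List String := PySem.Str.split₀ binary_code
  let lines : List String :=
    (PySem.List.pyRange 0 (tokens.length : Int) 3).foldl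
      (fun acc i =>
        let group := PySem.List.slice tokens (some i) (some (i + 3))
        acc ++ [" " ++ PySem.Str.join " " group ++ (if group.length = 3 then "\n" else " ")]) []
  PySem.Str.join "" lines

-- ===== PRECONDITION & SPEC =====
def Spec_binary_format (binary_code : String) (out : String) : Prop := out = binary_format_alt binary_code
instance (binary_code : String) (out : String) : Decidable (Spec_binary_format binary_code out) := by unfold Spec_binary_format; infer_instance

-- ===== CLAIM (what is proved, stated in full; the proofs are below) =====
def Claim_equal_binary_format : Prop := ∀ (binary_code : String), Dom_binary_format binary_code → Spec_binary_format binary_code (binary_format binary_code)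

-- ===== LEMMAS AND PROOFS =====

def pvSuf (i : Nat) : String := if (i+1) % 3 = 0 then "\n" else " "
def pvG2 (i : Nat) (t : String) : String :=
  if i = 0 then " " ++ (t ++ pvSuf 0) else t ++ pvSuf i

theorem map_enumerate_eq_mapIdx {α β : Type} (xs : List α) (s : Int) (f : Int × α → β) :
    (PySem.List.enumerate xs s).map f = xs.mapIdx (fun k x => f (s + k, x)) := by
  induction xs generalizing s with
  | nil => simp
  | cons a l ih =>
    rw [PySem.List.enumerate_cons, List.map_cons, List.mapIdx_cons, ih]
    simp only [Nat.cast_zero, add_zero]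
    congr 1
    apply List.mapIdx_eq_mapIdx_iff.mpr
    intro i hi
    congr 2
    push_cast; ring

theorem pvNew1 (ts : List String) :
    (PySem.List.enumerate ts 0).foldl
      (fun acc p =>
        acc ++ [if PySem.Int.mod (p.1 + 1) 3 = 0 then p.2 ++ "\n" else p.2 ++ " "]) []
    = ts.mapIdx (fun k t => t ++ pvSuf k) := by
  rw [PySem.List.foldl_append_singleton_eq_map
      (fun p : Int × String => if PySem.Int.mod (p.1 + 1) 3 = 0 then p.2 ++ "\n" else p.2 ++ " ")]
  rw [List.nil_append, map_enumerate_eq_mapIdx]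
  apply List.mapIdx_eq_mapIdx_iff.mpr
  intro k hk
  simp only [zero_add]
  have hc : ((k : Int) + 1) = ((k + 1 : Nat) : Int) := by push_cast; ring
  rw [hc]
  have hm : PySem.Int.mod ((k + 1 : Nat) : Int) 3 = (((k+1) % 3 : Nat) : Int) := by
    exact_mod_cast PySem.Int.mod_natCast (k+1) 3
  rw [hm, pvSuf]
  by_cases h3 : (k+1) % 3 = 0
  · rw [if_pos h3, if_pos (by exact_mod_cast h3)]
  · rw [if_neg h3, if_neg (by exact_mod_cast h3)]


def pvStep (n : Int) (lst : List String) (i : Int) : List String :=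
  let b := PySem.List.pyGetD lst i ""
  if i ≠ n - 1 then
    if PySem.Str.isIn "\n" b then
      lst.set (i + 1).toNat (" " ++ PySem.List.pyGetD lst (i + 1) "")
    else lst
  else lst

theorem isIn_nl_space_append (t : String) :
    PySem.Str.isIn "\n" (" " ++ t) = PySem.Str.isIn "\n" t := by
  have h1 : (" " ++ t).toList = ' ' :: t.toList := by
    rw [String.toList_append]; rfl
  simp only [PySem.Str.isIn, h1]
  have h2 : "\n".toList = ['\n'] := rfl
  rw [h2]
  rcases hc : PySem.Chars.isIn ['\n'] t.toList with _ | _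
  · rw [PySem.Chars.isIn_eq_false_iff, List.singleton_infix_iff] at hc ⊢
    simpa using hc
  · rw [PySem.Chars.isIn_iff_infix, List.singleton_infix_iff] at hc ⊢
    simp [hc]

def pvTgt (v : List String) (k : Nat) : List String :=
  v.mapIdx (fun j b =>
    if 1 ≤ j ∧ j ≤ k ∧ PySem.Str.isIn "\n" (v.getD (j-1) "") = true then " " ++ b else b)

theorem pvTgt_length (v : List String) (k : Nat) : (pvTgt v k).length = v.length := by
  simp [pvTgt]

theorem pvTgt_getElem (v : List String) (k : Nat) (j : Nat) (hj : j < (pvTgt v k).length) :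
    (pvTgt v k)[j] =
      if 1 ≤ j ∧ j ≤ k ∧ PySem.Str.isIn "\n" (v.getD (j-1) "") = true
      then " " ++ v[j]'(by simpa [pvTgt_length] using hj) else v[j]'(by simpa [pvTgt_length] using hj) := by
  simp [pvTgt]

theorem foldA (v : List String) (k : Nat) (hk : k ≤ v.length) :
    (PySem.List.pyRange 0 (k : Int) 1).foldl (pvStep (v.length : Int)) v = pvTgt v k := by
  induction k with
  | zero =>
    rw [PySem.List.pyRange_one_eq_nil (by norm_num)]
    simp only [List.foldl_nil]
    apply List.ext_getElem (by simp [pvTgt_length])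
    intro i h1 h2
    rw [pvTgt_getElem]
    split
    · omega
    · rfl
  | succ k ih =>
    have hk' : k ≤ v.length := by omega
    have hcast : ((k+1 : Nat) : Int) = (k : Int) + 1 := by push_cast; ring
    rw [hcast, PySem.List.pyRange_one_succ_right (by positivity), List.foldl_append,
        ih hk']
    simp only [List.foldl_cons, List.foldl_nil]
    have hklt : k < v.length := by omega
    have hb : PySem.Str.isIn "\n" (PySem.List.pyGetD (pvTgt v k) (k : Int) "")
        = PySem.Str.isIn "\n" (v.getD k "") := by
      rw [PySem.List.pyGetD_natCast, List.getD_eq_getElem _ _ (by rw [pvTgt_length]; omega),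
          pvTgt_getElem]
      rw [List.getD_eq_getElem _ _ hklt]
      split
      · rw [isIn_nl_space_append]
      · rfl
    unfold pvStep
    by_cases hlast : k + 1 = v.length
    · have hguard : ¬ ((k : Int) ≠ (v.length : Int) - 1) := by omega
      simp only [hguard, if_false]
      apply List.ext_getElem (by simp [pvTgt_length])
      intro j hj1 hj2
      rw [pvTgt_getElem, pvTgt_getElem]
      have hjlt : j < v.length := by simpa [pvTgt_length] using hj1
      by_cases hc : 1 ≤ j ∧ j ≤ k ∧ PySem.Str.isIn "\n" (v.getD (j-1) "") = true
      · rw [if_pos hc, if_pos ⟨hc.1, by omega, hc.2.2⟩]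
      · rw [if_neg hc, if_neg (by intro h; exact hc ⟨h.1, by omega, h.2.2⟩)]
    · have hguard : ((k : Int) ≠ (v.length : Int) - 1) := by omega
      simp only [if_pos hguard, hb]
      by_cases hnl : PySem.Str.isIn "\n" (v.getD k "") = true
      · rw [if_pos hnl]
        have htn : ((k : Int) + 1).toNat = k + 1 := by omega
        rw [htn]
        have hget1 : PySem.List.pyGetD (pvTgt v k) ((k : Int) + 1) ""
            = v[k+1]'(by omega) := by
          have : ((k : Int) + 1) = ((k+1 : Nat) : Int) := by push_cast; ring
          rw [this, PySem.List.pyGetD_natCast,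
              List.getD_eq_getElem _ _ (by rw [pvTgt_length]; omega), pvTgt_getElem]
          rw [if_neg (by intro h; omega)]
        rw [hget1]
        apply List.ext_getElem (by simp [pvTgt_length])
        intro j hj1 hj2
        rw [List.getElem_set]
        by_cases hjk : k + 1 = j
        · rw [if_pos hjk]
          subst hjk
          rw [pvTgt_getElem, if_pos ⟨by omega, by omega, by
            simpa only [Nat.add_sub_cancel] using hnl⟩]
        · rw [if_neg hjk, pvTgt_getElem, pvTgt_getElem]
          replace hjk : ¬ j = k + 1 := fun h => hjk h.symm
          by_cases hc : 1 ≤ j ∧ j ≤ k ∧ PySem.Str.isIn "\n" (v.getD (j-1) "") = true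
          · rw [if_pos hc, if_pos ⟨hc.1, by omega, hc.2.2⟩]
          · rw [if_neg hc, if_neg (by intro h; refine hc ⟨h.1, ?_, h.2.2⟩; omega)]
      · rw [if_neg hnl]
        apply List.ext_getElem (by simp [pvTgt_length])
        intro j hj1 hj2
        rw [pvTgt_getElem, pvTgt_getElem]
        by_cases hc : 1 ≤ j ∧ j ≤ k ∧ PySem.Str.isIn "\n" (v.getD (j-1) "") = true
        · rw [if_pos hc, if_pos ⟨hc.1, by omega, hc.2.2⟩]
        · rw [if_neg hc]
          rw [if_neg (by
            intro h
            refine hc ⟨h.1, ?_, h.2.2⟩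
            rcases Nat.lt_or_ge k j with hlt | hge
            · exfalso
              have hj : j = k + 1 := by omega
              subst hj
              simp only [Nat.add_sub_cancel] at h
              exact hnl h.2.2
            · exact hge)]


theorem pvGoWs (s : List Char) : ∀ (cur : List Char) (acc : List (List Char)),
    (∀ c ∈ cur, PySem.Chars.isspace c = false) →
    (∀ t ∈ acc, ∀ c ∈ t, PySem.Chars.isspace c = false) →
    ∀ t ∈ PySem.Chars.split₀.go s cur acc, ∀ c ∈ t, PySem.Chars.isspace c = false := by
  induction s with
  | nil =>
    intro cur acc hcur hacc t ht
    simp only [PySem.Chars.split₀.go] at ht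
    split at ht
    · simp only [List.mem_reverse] at ht
      exact hacc t ht
    · simp only [List.mem_reverse, List.mem_cons] at ht
      rcases ht with h | h
      · subst h; intro c hc; exact hcur c (by simpa using hc)
      · exact hacc t h
  | cons a rest ih =>
    intro cur acc hcur hacc t ht
    simp only [PySem.Chars.split₀.go] at ht
    split at ht
    · split at ht
      · exact ih [] acc (by simp) hacc t ht
      · refine ih [] (cur.reverse :: acc) (by simp) ?_ t ht
        intro u hu
        rcases List.mem_cons.mp hu with h | h
        · subst h; intro c hc; exact hcur c (by simpa using hc)
        · exact hacc u h
    · next hsp =>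
      refine ih (a :: cur) acc ?_ hacc t ht
      intro c hc
      rcases List.mem_cons.mp hc with h | h
      · subst h; simpa using hsp
      · exact hcur c h

theorem pvSplitNoNL (s : String) : ∀ t ∈ PySem.Str.split₀ s, '\n' ∉ t.toList := by
  intro t ht hmem
  simp only [PySem.Str.split₀, List.mem_map] at ht
  obtain ⟨l, hl, rfl⟩ := ht
  rw [String.toList_ofList] at hmem
  have := pvGoWs s.toList [] [] (by simp) (by simp) l (by simpa [PySem.Chars.split₀] using hl) '\n' hmem
  simp [PySem.Chars.isspace] at this

def pvCell (i : Nat) (t : String) : String :=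
  if i % 3 = 0 then " " ++ (t ++ pvSuf i) else t ++ pvSuf i

theorem isIn_nl_mem (x : String) : PySem.Str.isIn "\n" x = true ↔ '\n' ∈ x.toList := by
  rw [PySem.Str.isIn_iff_infix]
  have h2 : "\n".toList = ['\n'] := rfl
  rw [h2, List.singleton_infix_iff]

theorem isIn_pvG2 (i : Nat) (t : String) (h : '\n' ∉ t.toList) :
    PySem.Str.isIn "\n" (pvG2 i t) = decide ((i+1) % 3 = 0) := by
  have hmem : '\n' ∈ (pvG2 i t).toList ↔ (i+1) % 3 = 0 := by
    unfold pvG2 pvSuf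
    by_cases hi : i = 0
    · subst hi
      simp [String.toList_append, h]
    · rw [if_neg hi]
      by_cases h3 : (i+1) % 3 = 0
      · simp [String.toList_append, h, h3]
      · simp [String.toList_append, h, h3]
  rcases hd : decide ((i+1) % 3 = 0) with _ | _
  · simp only [decide_eq_false_iff_not] at hd
    rw [← Bool.not_eq_true, isIn_nl_mem]
    exact fun hc => hd (hmem.mp hc)
  · simp only [decide_eq_true_eq] at hd
    rw [isIn_nl_mem]
    exact hmem.mpr hd


def pvABody (ts : List String) : String :=
  let new1 : List String :=
    (PySem.List.enumerate ts 0).foldl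
      (fun acc p =>
        acc ++ [if PySem.Int.mod (p.1 + 1) 3 = 0 then p.2 ++ "\n" else p.2 ++ " "]) []
  let new2 : List String :=
    match new1 with
    | [] => []
    | h :: t => (" " ++ h) :: t
  let n : Int := (new2.length : Int)
  let new3 : List String :=
    (PySem.List.pyRange 0 n 1).foldl
      (fun lst i =>
        let b := PySem.List.pyGetD lst i ""
        if i ≠ n - 1 then
          if PySem.Str.isIn "\n" b then
            lst.set (i + 1).toNat (" " ++ PySem.List.pyGetD lst (i + 1) "")
          else lst
        else lst) new2
  PySem.Str.join "" new3

theorem pvNew2 (h : String) (tl : List String) :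
    (match (h :: tl).mapIdx (fun k t => t ++ pvSuf k) with
      | [] => ([] : List String)
      | hh :: t => (" " ++ hh) :: t)
    = (h :: tl).mapIdx pvG2 := by
  rw [List.mapIdx_cons, List.mapIdx_cons]
  simp only []
  congr 1

theorem pvTgt_pvG2 (ts : List String) (hts : ∀ t ∈ ts, '\n' ∉ t.toList) :
    pvTgt (ts.mapIdx pvG2) (ts.mapIdx pvG2).length = ts.mapIdx pvCell := by
  apply List.ext_getElem (by simp [pvTgt_length])
  intro j hj1 hj2
  have hjts : j < ts.length := by simpa [pvTgt_length] using hj1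
  rw [pvTgt_getElem]
  simp only [List.getElem_mapIdx]
  by_cases hj0 : j = 0
  · subst hj0
    rw [if_neg (by omega)]
    rw [pvG2, if_pos rfl, pvCell, if_pos (by norm_num)]
  · have hget : (ts.mapIdx pvG2).getD (j-1) "" = pvG2 (j-1) (ts[j-1]'(by omega)) := by
      rw [List.getD_eq_getElem _ _ (by simp; omega), List.getElem_mapIdx]
    rw [hget, isIn_pvG2 _ _ (hts _ (List.getElem_mem _)), pvG2, if_neg hj0]
    have hsub : j - 1 + 1 = j := by omega
    rw [hsub]
    by_cases h3 : j % 3 = 0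
    · rw [if_pos ⟨by omega, by simp; omega, by simp [h3]⟩,
          pvCell, if_pos h3]
    · rw [if_neg (by intro hc; exact h3 (by simpa using hc.2.2)), pvCell, if_neg h3]

theorem pvABody_eq (ts : List String) (hts : ∀ t ∈ ts, '\n' ∉ t.toList) :
    pvABody ts = PySem.Str.join "" (ts.mapIdx pvCell) := by
  unfold pvABody
  simp only [pvNew1]
  cases ts with
  | nil => rfl
  | cons h tl =>
    rw [pvNew2 h tl]
    have hfold : (PySem.List.pyRange 0 (((h :: tl).mapIdx pvG2).length : Int) 1).foldl
        (fun lst i =>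
          if i ≠ (((h :: tl).mapIdx pvG2).length : Int) - 1 then
            if PySem.Str.isIn "\n" (PySem.List.pyGetD lst i "") = true then
              lst.set (i + 1).toNat (" " ++ PySem.List.pyGetD lst (i + 1) "")
            else lst
          else lst) ((h :: tl).mapIdx pvG2)
        = pvTgt ((h :: tl).mapIdx pvG2) ((h :: tl).mapIdx pvG2).length :=
      foldA ((h :: tl).mapIdx pvG2) ((h :: tl).mapIdx pvG2).length (le_refl _)
    rw [hfold, pvTgt_pvG2 _ hts]

def pvLine (ts : List String) (i : Int) : String :=
  " " ++ PySem.Str.join " " (PySem.List.slice ts (some i) (some (i + 3))) ++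
    (if (PySem.List.slice ts (some i) (some (i + 3))).length = 3 then "\n" else " ")

def pvChunkC : List String → List Char
  | [] => []
  | [a] => ' ' :: (a.toList ++ [' '])
  | [a, b] => ' ' :: (a.toList ++ ' ' :: (b.toList ++ [' ']))
  | a :: b :: c :: rest =>
      ' ' :: (a.toList ++ ' ' :: (b.toList ++ ' ' :: (c.toList ++ '\n' :: pvChunkC rest)))

theorem join_nil_cons (p : List Char) (parts : List (List Char)) :
    PySem.Chars.join [] (p :: parts) = p ++ PySem.Chars.join [] parts := by
  cases parts with
  | nil => simp [PySem.Chars.join_singleton, PySem.Chars.join_nil]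
  | cons q r => rw [PySem.Chars.join_cons_cons]; simp

theorem pvCell_shift (i : Nat) (t : String) : pvCell (i + 3) t = pvCell i t := by
  unfold pvCell pvSuf
  have h1 : (i + 3) % 3 = i % 3 := Nat.add_mod_right i 3
  have h2 : (i + 3 + 1) % 3 = (i + 1) % 3 := by omega
  rw [h1, h2]

theorem pvL5 (ts : List String) :
    PySem.Chars.join [] ((ts.mapIdx pvCell).map String.toList) = pvChunkC ts := by
  induction ts using pvChunkC.induct with
  | case1 => simp [PySem.Chars.join_nil, pvChunkC]
  | case2 a =>
    rw [pvChunkC]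
    simp only [List.mapIdx_cons, List.mapIdx_nil, List.map_cons, List.map_nil,
      PySem.Chars.join_singleton]
    simp [pvCell, pvSuf, String.toList_append]
  | case3 a b =>
    rw [pvChunkC]
    simp only [List.mapIdx_cons, List.mapIdx_nil, List.map_cons, List.map_nil]
    rw [join_nil_cons, PySem.Chars.join_singleton]
    simp [pvCell, pvSuf, String.toList_append]
  | case4 a b c rest ih =>
    rw [pvChunkC]
    simp only [List.mapIdx_cons, List.map_cons]
    rw [join_nil_cons, join_nil_cons, join_nil_cons]
    have hsh : rest.mapIdx (fun i => pvCell (i + 1 + 1 + 1)) = rest.mapIdx pvCell := by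
      apply List.mapIdx_eq_mapIdx_iff.mpr
      intro i hi
      have : i + 1 + 1 + 1 = i + 3 := by omega
      rw [this, pvCell_shift]
    rw [hsh, ih]
    simp [pvCell, pvSuf, String.toList_append]

theorem pvRange3 (m : Nat) :
    PySem.List.pyRange 0 ((m : Int) + 3) 3 = 0 :: (PySem.List.pyRange 0 (m : Int) 3).map (· + 3) := by
  rw [PySem.List.pyRange_of_pos _ _ (by norm_num), PySem.List.pyRange_of_pos _ _ (by norm_num)]
  have e1 : ((m : Int) + 3 - 0 + 3 - 1) = ((m + 5 : Nat) : Int) := by push_cast; ring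
  have hc1 : ((((m : Int) + 3 - 0 + 3 - 1)) / 3).toNat = (m + 5) / 3 := by
    rw [e1, show ((3:Int)) = ((3:Nat):Int) from rfl, ← Int.natCast_ediv, Int.toNat_natCast]
  rw [if_pos (by omega), hc1]
  by_cases hm : (0 : Int) < (m : Int)
  · have e2 : ((m : Int) - 0 + 3 - 1) = ((m + 2 : Nat) : Int) := by push_cast; ring
    have hc2 : (((m : Int) - 0 + 3 - 1) / 3).toNat = (m + 2) / 3 := by
      rw [e2, show ((3:Int)) = ((3:Nat):Int) from rfl, ← Int.natCast_ediv, Int.toNat_natCast]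
    rw [if_pos hm, hc2]
    have hcount : (m + 5) / 3 = (m + 2) / 3 + 1 := by omega
    rw [hcount, List.range_succ_eq_map]
    simp only [List.map_cons, List.map_map]
    congr 1
  · have hm0 : m = 0 := by omega
    subst hm0
    rw [if_neg hm]
    have : (0 + 5) / 3 = 1 := by norm_num
    rw [this]
    simp only [List.range_succ_eq_map, List.range_zero, List.map_nil, List.map_cons]
    norm_num

theorem pvLine_shift (a b c : String) (rest : List String) (j : Nat) :
    pvLine (a :: b :: c :: rest) ((j + 3 : Nat) : Int) = pvLine rest (j : Int) := by
  unfold pvLine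
  have e1 : ((j + 3 : Nat) : Int) + 3 = ((j + 6 : Nat) : Int) := by push_cast; ring
  have e2 : ((j : Nat) : Int) + 3 = ((j + 3 : Nat) : Int) := by push_cast; ring
  rw [e1, e2, PySem.List.slice_natCast, PySem.List.slice_natCast]
  have h6 : (a :: b :: c :: rest).drop (j + 3) = rest.drop j := by
    rw [show j + 3 = j + 1 + 1 + 1 from rfl]
    simp [List.drop_succ_cons]
  rw [show j + 6 - (j + 3) = 3 from by omega, show j + 3 - j = 3 from by omega, h6]

theorem pvL6 (ts : List String) :
    PySem.Chars.join []
      (((PySem.List.pyRange 0 (ts.length : Int) 3).map (pvLine ts)).map String.toList)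
    = pvChunkC ts := by
  induction ts using pvChunkC.induct with
  | case1 =>
    have : PySem.List.pyRange 0 ((List.length ([] : List String) : Int)) 3 = [] := by decide
    rw [this]
    simp [PySem.Chars.join_nil, pvChunkC]
  | case2 a =>
    have hl : ((List.length [a] : Nat) : Int) = 1 := by simp
    rw [hl, show PySem.List.pyRange 0 1 3 = [0] from by decide]
    simp only [List.map_cons, List.map_nil, PySem.Chars.join_singleton]
    unfold pvLine
    have hs : PySem.List.slice [a] (some 0) (some (0 + 3)) = [a] := by
      have : PySem.List.slice [a] (some ((0 : Nat) : Int)) (some ((3 : Nat) : Int)) = [a] := by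
        rw [PySem.List.slice_natCast]; rfl
      simpa using this
    rw [hs]
    rw [pvChunkC]
    simp [PySem.Str.join, PySem.Chars.join_singleton, String.toList_append]
  | case3 a b =>
    have hl : ((List.length [a, b] : Nat) : Int) = 2 := by simp
    rw [hl, show PySem.List.pyRange 0 2 3 = [0] from by decide]
    simp only [List.map_cons, List.map_nil, PySem.Chars.join_singleton]
    unfold pvLine
    have hs : PySem.List.slice [a, b] (some 0) (some (0 + 3)) = [a, b] := by
      have : PySem.List.slice [a, b] (some ((0 : Nat) : Int)) (some ((3 : Nat) : Int)) = [a, b] := by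
        rw [PySem.List.slice_natCast]; rfl
      simpa using this
    rw [hs]
    rw [pvChunkC]
    simp [PySem.Str.join, PySem.Chars.join_cons_cons, PySem.Chars.join_singleton,
      String.toList_append]
  | case4 a b c rest ih =>
    have hlen : ((List.length (a :: b :: c :: rest) : Int)) = ((rest.length : Int) + 3) := by
      push_cast [List.length_cons]; ring
    rw [hlen, pvRange3]
    simp only [List.map_cons]
    rw [join_nil_cons]
    have hmap : ((PySem.List.pyRange 0 ((rest.length : Int)) 3).map (· + 3)).map
        (pvLine (a :: b :: c :: rest))
        = (PySem.List.pyRange 0 ((rest.length : Int)) 3).map (pvLine rest) := by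
      rw [List.map_map]
      apply List.map_congr_left
      intro i hi
      have hpos : 0 ≤ i := by
        rw [PySem.List.pyRange_of_pos _ _ (by norm_num)] at hi
        simp only [List.mem_map] at hi
        obtain ⟨k, _, rfl⟩ := hi
        positivity
      obtain ⟨j, rfl⟩ := Int.eq_ofNat_of_zero_le hpos
      simp only [Function.comp_apply]
      rw [show ((j : Nat) : Int) + 3 = ((j + 3 : Nat) : Int) from by push_cast; ring]
      exact pvLine_shift a b c rest j
    rw [hmap, ih]
    -- head line
    unfold pvLine
    have hs : PySem.List.slice (a :: b :: c :: rest) (some 0) (some (0 + 3)) = [a, b, c] := by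
      have : PySem.List.slice (a :: b :: c :: rest) (some ((0 : Nat) : Int)) (some ((3 : Nat) : Int))
          = [a, b, c] := by
        rw [PySem.List.slice_natCast]; rfl
      simpa using this
    rw [hs]
    rw [pvChunkC]
    simp [PySem.Str.join, PySem.Chars.join_cons_cons, PySem.Chars.join_singleton,
      String.toList_append]


-- ===== VERDICT (by name: the statement is the Claim_ definition above) =====
theorem binary_format_spec : Claim_equal_binary_format := by
  unfold Claim_equal_binary_format Spec_binary_format
  intro s _
  have hA : binary_format s = pvABody (PySem.Str.split₀ s) := rfl
  have hB : binary_format_alt s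
      = PySem.Str.join ""
        ((PySem.List.pyRange 0 (((PySem.Str.split₀ s)).length : Int) 3).foldl
          (fun acc i => acc ++ [pvLine (PySem.Str.split₀ s) i]) []) := rfl
  rw [hA, hB, PySem.List.foldl_append_singleton_eq_map, List.nil_append,
      pvABody_eq _ (pvSplitNoNL s)]
  apply String.ext
  rw [PySem.Str.toList_join, PySem.Str.toList_join,
      show ("" : String).toList = [] from rfl, pvL5, pvL6]
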